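-- pv_equiv track=rewrite | github.com/danielholmes839/Sobel-Operator | functions.py | get_vertical_values
-- ===== SOURCE A (Python) =====
-- def get_vertical_values(pixels, width, height):
--     """ get the vertical values for the sobel operator """
--     vertical_values = []
--
--     stop_y = height - 1
--     stop_x = width - 1
--
--     for y in range(1, stop_y):
--         vertical_values.append([])
--         for x in range(1, stop_x):
--             value = 0
--
--             value += pixels[y-1][x-1][0]
--             value += pixels[y][x-1][0] * 2
--             value += pixels[y+1][x-1][0]
--
--             value += -pixels[y-1][x+1][0]
--             value += -pixels[y][x+1][0] * 2
--             value += -pixels[y+1][x+1][0]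
--
--             vertical_values[y-1].append(value)
--
--     return vertical_values
-- ===== SOURCE B (Python) =====
-- def get_vertical_values(pixels, width, height):
--     """ Separable Sobel: horizontal differences once per row, then a [1,2,1] vertical blend. """
--     if height < 3:
--         return []
--     hdiff = [[pixels[y][x - 1][0] - pixels[y][x + 1][0] for x in range(1, width - 1)]
--              for y in range(height)]
--     return [[a + 2 * b + c for (a, b), c in zip(zip(hdiff[y - 1], hdiff[y]), hdiff[y + 1])]
--             for y in range(1, height - 1)]
-- ===== Notes on version B (the rewrite author's own statement) =====
-- stated objective: alternative
-- what changed: Exploits the Sobel kernel's separability: B precomputes one horizontal-difference table (pixels[y][x-1][0] - pixels[y][x+1][0]) per row and then blends three table rows with weights [1,2,1], instead of A's six 3-deep pixel lookups per output cell.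
import Mathlib
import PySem

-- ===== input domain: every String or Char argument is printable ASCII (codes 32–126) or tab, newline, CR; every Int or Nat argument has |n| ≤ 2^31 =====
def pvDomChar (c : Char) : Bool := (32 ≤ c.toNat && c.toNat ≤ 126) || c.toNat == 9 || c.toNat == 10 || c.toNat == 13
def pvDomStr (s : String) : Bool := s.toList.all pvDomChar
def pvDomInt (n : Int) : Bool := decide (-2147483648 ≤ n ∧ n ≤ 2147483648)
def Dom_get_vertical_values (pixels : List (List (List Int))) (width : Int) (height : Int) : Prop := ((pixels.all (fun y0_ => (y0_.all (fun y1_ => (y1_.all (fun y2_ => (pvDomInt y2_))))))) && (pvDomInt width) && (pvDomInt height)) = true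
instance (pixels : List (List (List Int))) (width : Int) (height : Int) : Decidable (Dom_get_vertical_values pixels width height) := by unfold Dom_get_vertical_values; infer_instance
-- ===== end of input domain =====

-- B computes the Sobel vertical gradient via kernel separability ([1,2,1]^T * [1,0,-1]):
-- one horizontal-difference table per row, then a [1,2,1] vertical blend (alternative decomposition).


-- ===== PORT A =====
def get_vertical_values (pixels : List (List (List Int))) (width : Int) (height : Int) : List (List Int) :=
  let stop_y := height - 1
  let stop_x := width - 1
  (PySem.List.pyRange 1 stop_y 1).foldl
    (fun vv y =>
      let vv := vv ++ [([] : List Int)]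
      (PySem.List.pyRange 1 stop_x 1).foldl
        (fun vv x =>
          let value : Int := 0
          let value := value + PySem.List.pyGetD (PySem.List.pyGetD (PySem.List.pyGetD pixels (y-1) []) (x-1) []) 0 0
          let value := value + PySem.List.pyGetD (PySem.List.pyGetD (PySem.List.pyGetD pixels y []) (x-1) []) 0 0 * 2
          let value := value + PySem.List.pyGetD (PySem.List.pyGetD (PySem.List.pyGetD pixels (y+1) []) (x-1) []) 0 0
          let value := value + -PySem.List.pyGetD (PySem.List.pyGetD (PySem.List.pyGetD pixels (y-1) []) (x+1) []) 0 0
          let value := value + -PySem.List.pyGetD (PySem.List.pyGetD (PySem.List.pyGetD pixels y []) (x+1) []) 0 0 * 2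
          let value := value + -PySem.List.pyGetD (PySem.List.pyGetD (PySem.List.pyGetD pixels (y+1) []) (x+1) []) 0 0
          vv.modify (y-1).toNat (fun row => row ++ [value]))
        vv)
    []

-- ===== PORT B =====
def get_vertical_values_alt (pixels : List (List (List Int))) (width : Int) (height : Int) : List (List Int) :=
  if height < 3 then []
  else
    let hdiff : List (List Int) :=
      (PySem.List.pyRange 0 height 1).map (fun y =>
        (PySem.List.pyRange 1 (width - 1) 1).map (fun x =>
          PySem.List.pyGetD (PySem.List.pyGetD (PySem.List.pyGetD pixels y []) (x-1) []) 0 0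
            - PySem.List.pyGetD (PySem.List.pyGetD (PySem.List.pyGetD pixels y []) (x+1) []) 0 0))
    (PySem.List.pyRange 1 (height - 1) 1).map (fun y =>
      (((PySem.List.pyGetD hdiff (y-1) []).zip (PySem.List.pyGetD hdiff y [])).zip
          (PySem.List.pyGetD hdiff (y+1) [])).map
        (fun p => p.1.1 + 2 * p.1.2 + p.2))

-- ===== PRECONDITION & SPEC =====
-- Pre_ excludes exactly the inputs on which the Python A raises IndexError: whenever both loops
-- run (height ≥ 3 and width ≥ 3), the grid must have at least `height` rows, each accessed row at
-- least `width` pixels, and every accessed pixel (columns x±1 for x in range(1, width-1)) nonempty.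
def Pre_get_vertical_values (pixels : List (List (List Int))) (width : Int) (height : Int) : Prop :=
  3 ≤ height → 3 ≤ width →
    height ≤ pixels.length ∧
    ∀ row ∈ pixels.take height.toNat,
      width ≤ row.length ∧
      ∀ x ∈ PySem.List.pyRange 1 (width - 1) 1,
        PySem.List.pyGetD row (x - 1) [] ≠ [] ∧ PySem.List.pyGetD row (x + 1) [] ≠ []
instance (pixels : List (List (List Int))) (width : Int) (height : Int) : Decidable (Pre_get_vertical_values pixels width height) := by unfold Pre_get_vertical_values; infer_instance

def pvWitness_get_vertical_values : List (List (List Int)) × Int × Int :=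
  ([[[1],[2],[3]],[[4],[5],[6]],[[7],[8],[9]]], 3, 3)

def Spec_get_vertical_values (pixels : List (List (List Int))) (width : Int) (height : Int) (out : List (List Int)) : Prop := out = get_vertical_values_alt pixels width height
instance (pixels : List (List (List Int))) (width : Int) (height : Int) (out : List (List Int)) : Decidable (Spec_get_vertical_values pixels width height out) := by unfold Spec_get_vertical_values; infer_instance

-- ===== CLAIM (what is proved, stated in full; the proofs are below) =====
def Claim_equal_get_vertical_values : Prop := ∀ (pixels : List (List (List Int))) (width : Int) (height : Int), Dom_get_vertical_values pixels width height → Pre_get_vertical_values pixels width height → Spec_get_vertical_values pixels width height (get_vertical_values pixels width height)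

-- ===== LEMMAS AND PROOFS =====

-- pixels[y][x][0] with Python's default-on-miss reading, shared vocabulary of the proofs
def pvPx (p : List (List (List Int))) (y x : Int) : Int :=
  PySem.List.pyGetD (PySem.List.pyGetD (PySem.List.pyGetD p y []) x []) 0 0

-- the value A computes at (y, x)
def pvValA (p : List (List (List Int))) (y x : Int) : Int :=
  0 + pvPx p (y-1) (x-1) + pvPx p y (x-1) * 2 + pvPx p (y+1) (x-1)
    + -pvPx p (y-1) (x+1) + -(pvPx p y (x+1) * 2) + -pvPx p (y+1) (x+1)

-- the canonical matrix both ports are reduced to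
def pvM (p : List (List (List Int))) (w h : Int) : List (List Int) :=
  (PySem.List.pyRange 1 (h - 1) 1).map (fun y =>
    (PySem.List.pyRange 1 (w - 1) 1).map (fun x => pvValA p y x))

theorem pv_modify_append_last {α : Type} (acc : List α) (r : α) (f : α → α) :
    (acc ++ [r]).modify acc.length f = acc ++ [f r] := by
  induction acc with
  | nil => simp [List.modify]
  | cons a t ih => simpa [List.modify] using ih

-- the inner loop: repeatedly appending to the last row builds that row by map
theorem pv_inner (g : Int → Int) (xs : List Int) :
    ∀ (acc : List (List Int)) (r : List Int),
      xs.foldl (fun vv x => vv.modify acc.length (fun row => row ++ [g x])) (acc ++ [r])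
        = acc ++ [r ++ xs.map g] := by
  induction xs with
  | nil => intro acc r; simp
  | cons x xs ih =>
      intro acc r
      simp only [List.foldl_cons, pv_modify_append_last]
      simpa using ih acc (r ++ [g x])

-- the outer loop of A, with the row counter tracked by acc.length
theorem pv_outer (p : List (List (List Int))) (sx : Int) (b : Int) :
    ∀ (a : Int) (acc : List (List Int)), 1 ≤ a → acc.length = (a - 1).toNat →
      (PySem.List.pyRange a b 1).foldl
        (fun vv y =>
          (PySem.List.pyRange 1 sx 1).foldl
            (fun vv x => vv.modify (y-1).toNat (fun row => row ++ [pvValA p y x]))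
            (vv ++ [([] : List Int)]))
        acc
      = acc ++ (PySem.List.pyRange a b 1).map (fun y =>
          (PySem.List.pyRange 1 sx 1).map (fun x => pvValA p y x)) := by
  intro a acc ha hlen
  by_cases hab : a < b
  · rw [PySem.List.pyRange_one_cons hab]
    simp only [List.foldl_cons, List.map_cons]
    have hk : (a - 1).toNat = acc.length := hlen.symm
    have hstep :
        (PySem.List.pyRange 1 sx 1).foldl
          (fun vv x => vv.modify (a-1).toNat (fun row => row ++ [pvValA p a x]))
          (acc ++ [([] : List Int)])
        = acc ++ [(PySem.List.pyRange 1 sx 1).map (fun x => pvValA p a x)] := by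
      rw [hk]
      simpa using pv_inner (fun x => pvValA p a x) (PySem.List.pyRange 1 sx 1) acc []
    rw [hstep,
      pv_outer p sx b (a + 1) (acc ++ [(PySem.List.pyRange 1 sx 1).map (fun x => pvValA p a x)])
        (by omega) (by simp [hlen]; omega)]
    simp
  · rw [PySem.List.pyRange_one_eq_nil (le_of_not_gt hab)]; simp
termination_by a _ _ _ => (b - a).toNat
decreasing_by omega

theorem pvA_eq (p : List (List (List Int))) (w h : Int) :
    get_vertical_values p w h = pvM p w h := by
  show (PySem.List.pyRange 1 (h-1) 1).foldl _ [] = _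
  have := pv_outer p (w - 1) (h - 1) 1 [] le_rfl (by simp)
  simpa [get_vertical_values, pvM, pvValA, pvPx] using this

theorem pvB_eq (p : List (List (List Int))) (w h : Int) :
    get_vertical_values_alt p w h = pvM p w h := by
  by_cases hh : h < 3
  · rw [get_vertical_values_alt, if_pos hh, pvM,
      PySem.List.pyRange_one_eq_nil (by omega : h - 1 ≤ 1)]
    simp
  · rw [get_vertical_values_alt, if_neg hh, pvM]
    refine List.map_congr_left (fun y hy => ?_)
    rcases PySem.List.mem_pyRange_one.mp hy with ⟨hy1, hy2⟩
    -- any row 0 ≤ i < h of the hdiff table, as a map over the column range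
    have hdrow : ∀ i : Int, 0 ≤ i → i < h →
        PySem.List.pyGetD
          ((PySem.List.pyRange 0 h 1).map (fun y =>
            (PySem.List.pyRange 1 (w - 1) 1).map (fun x =>
              PySem.List.pyGetD (PySem.List.pyGetD (PySem.List.pyGetD p y []) (x-1) []) 0 0
                - PySem.List.pyGetD (PySem.List.pyGetD (PySem.List.pyGetD p y []) (x+1) []) 0 0)))
          i []
        = (PySem.List.pyRange 1 (w - 1) 1).map (fun x =>
            pvPx p i (x-1) - pvPx p i (x+1)) := by
      intro i h0 h1
      have hlt : i < (((PySem.List.pyRange 0 h 1).map (fun y =>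
            (PySem.List.pyRange 1 (w - 1) 1).map (fun x =>
              PySem.List.pyGetD (PySem.List.pyGetD (PySem.List.pyGetD p y []) (x-1) []) 0 0
                - PySem.List.pyGetD (PySem.List.pyGetD (PySem.List.pyGetD p y []) (x+1) []) 0 0))).length : Int) := by
        simp [PySem.List.length_pyRange_one]; omega
      rw [PySem.List.pyGetD_eq_getElem _ _ h0 hlt]
      simp only [List.getElem_map, PySem.List.getElem_pyRange_one]
      have hi : (0 : Int) + (i.toNat : Int) = i := by omega
      rw [hi]; rfl
    rw [hdrow (y-1) (by omega) (by omega), hdrow y (by omega) (by omega),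
      hdrow (y+1) (by omega) (by omega)]
    rw [List.zip_map', List.zip_map', List.map_map]
    refine List.map_congr_left (fun x _ => ?_)
    simp only [Function.comp_apply, pvValA]
    ring

-- ===== VERDICT (by name: the statement is the Claim_ definition above) =====
theorem get_vertical_values_spec : Claim_equal_get_vertical_values := by
  intro pixels width height _ pre
  unfold Spec_get_vertical_values
  rw [pvA_eq, pvB_eq]
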